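-- pv_equiv track=rewrite | github.com/maxde18/mcp-bench | runtime/benchmark/evaluator.py | _format_available_tools
-- ===== SOURCE A (Python) =====
-- from typing import List, Dict, Any, Optional, Protocol
--
-- def _format_available_tools(available_tools: Dict[str, Any]) -> str:
--     """Format available tools with descriptions for display in evaluation prompt"""
--     if not available_tools:
--         return "No tools available"
--
--     # Group tools by server with descriptions
--     servers = {}
--     for tool_name, tool_info in available_tools.items():
--         server = tool_info.get('server', 'Unknown')
--         if server not in servers:
--             servers[server] = []
--
--         # Get tool description, truncate if too long
--         description = tool_info.get('description', 'No description available')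
--         if description is None:
--             description = 'No description available'
--         if len(description) > 500:
--             description = description[:500] + "..."
--
--         servers[server].append({
--             'name': tool_name,
--             'description': description
--         })
--
--     # Format output with ALL tools and descriptions
--     lines = []
--     for server, tools in sorted(servers.items()):
--         lines.append(f"[{server}] ({len(tools)} tools)")
--
--         # Show ALL tools with descriptions for each server
--         for tool in tools:
--             lines.append(f"  - {tool['name']}: {tool['description']}")
--
--         lines.append("")  # Empty line between servers
--
--     return '\n'.join(lines).strip() if lines else "No tools available"
-- ===== SOURCE B (Python) =====
-- def _format_available_tools(available_tools):
--     """Format available tools with descriptions for display in evaluation prompt"""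
--     if not available_tools:
--         return "No tools available"
--
--     # One flat pass: (server, tool_name, truncated_description) triples
--     rows = []
--     for tool_name, tool_info in available_tools.items():
--         server = tool_info.get('server', 'Unknown')
--         description = tool_info.get('description', 'No description available')
--         if description is None:
--             description = 'No description available'
--         if len(description) > 500:
--             description = description[:500] + "..."
--         rows.append((server, tool_name, description))
--
--     # Emit one block per distinct server, in sorted server order
--     parts = []
--     for server in sorted({r[0] for r in rows}):
--         group = [r for r in rows if r[0] == server]
--         parts.append(f"[{server}] ({len(group)} tools)")
--         parts.extend(f"  - {name}: {desc}" for _, name, desc in group)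
--         parts.append("")
--
--     return '\n'.join(parts).strip()
-- ===== Notes on version B (the rewrite author's own statement) =====
-- stated objective: alternative
-- what changed: Replaces A's incrementally-built dict of per-server lists (setdefault + append, then sorted(items())) with a flat one-pass list of (server, name, description) triples followed by one filtering pass per sorted distinct server.
import Mathlib
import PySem

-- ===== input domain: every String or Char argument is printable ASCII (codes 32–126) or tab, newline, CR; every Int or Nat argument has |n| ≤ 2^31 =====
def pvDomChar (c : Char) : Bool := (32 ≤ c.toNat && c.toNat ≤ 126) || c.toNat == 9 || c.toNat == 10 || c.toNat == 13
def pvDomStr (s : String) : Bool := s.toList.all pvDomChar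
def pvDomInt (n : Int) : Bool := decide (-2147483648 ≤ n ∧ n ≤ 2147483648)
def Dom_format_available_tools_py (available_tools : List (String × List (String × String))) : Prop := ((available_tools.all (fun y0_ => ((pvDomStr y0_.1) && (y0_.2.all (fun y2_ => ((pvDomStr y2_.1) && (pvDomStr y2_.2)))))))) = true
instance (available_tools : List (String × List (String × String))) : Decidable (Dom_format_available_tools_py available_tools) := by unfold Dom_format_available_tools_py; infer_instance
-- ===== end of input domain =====

-- B rewrites A's incremental dict-of-lists grouping as: one flat pass building
-- (server, name, description) triples, then one block per sorted distinct server
-- selected by filtering (objective: alternative decomposition, no grouping dict).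

-- shared formatting helpers (both Pythons compute these same strings)
def pvGetD (l : List (String × String)) (k dflt : String) : String :=
  PySem.Dict.getD ⟨l⟩ k dflt

def pvTrunc (d : String) : String :=
  if 500 < PySem.Str.len d then PySem.Str.slice d none (some 500) ++ "..." else d

def pvHeader (s : String) (n : Int) : String :=
  "[" ++ s ++ "] (" ++ PySem.Int.toStr n ++ " tools)"

def pvToolLine (n d : String) : String :=
  "  - " ++ n ++ ": " ++ d

-- ===== PORT A =====
-- loop body of A's grouping loop: servers.setdefault + append
def pvAStep (d : PySem.Dict String (List (String × String)))
    (p : String × List (String × String)) : PySem.Dict String (List (String × String)) :=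
  let server := pvGetD p.2 "server" "Unknown"
  let d := if d.contains server then d else d.insert server []
  let description := pvTrunc (pvGetD p.2 "description" "No description available")
  d.modify server [] (fun l => l ++ [(p.1, description)])

-- loop body of A's output loop over sorted(servers.items())
def pvAEmit (lines : List String) (q : String × List (String × String)) : List String :=
  let lines := lines ++ [pvHeader q.1 (q.2.length : Int)]
  let lines := q.2.foldl (fun lines t => lines ++ [pvToolLine t.1 t.2]) lines
  lines ++ [""]

def format_available_tools_py (available_tools : List (String × List (String × String))) : String :=
  if available_tools = [] then "No tools available" else
  let servers := available_tools.foldl pvAStep (PySem.Dict.mk [])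
  let lines := (PySem.List.sorted servers.items (fun q => q.1)).foldl pvAEmit []
  if lines = [] then "No tools available" else PySem.Str.strip (PySem.Str.join "\n" lines)

-- ===== PORT B =====
-- one row of B's flat pass: (server, tool_name, truncated description)
def pvRow (p : String × List (String × String)) : String × String × String :=
  (pvGetD p.2 "server" "Unknown", p.1, pvTrunc (pvGetD p.2 "description" "No description available"))

-- loop body of B's output loop over sorted({server})
def pvBEmit (rows : List (String × String × String)) (parts : List String) (s : String) : List String :=
  let group := rows.filter (fun r => r.1 == s)
  let parts := parts ++ [pvHeader s (group.length : Int)]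
  let parts := parts ++ group.map (fun r => pvToolLine r.2.1 r.2.2)
  parts ++ [""]

def format_available_tools_py_alt (available_tools : List (String × List (String × String))) : String :=
  if available_tools = [] then "No tools available" else
  let rows := available_tools.map pvRow
  let parts := (PySem.List.sorted (PySem.Set.ofList (rows.map (fun r => r.1))) (fun s => s)).foldl
    (pvBEmit rows) []
  PySem.Str.strip (PySem.Str.join "\n" parts)

-- ===== PRECONDITION & SPEC =====
def Spec_format_available_tools_py (available_tools : List (String × List (String × String))) (out : String) : Prop := out = format_available_tools_py_alt available_tools
instance (available_tools : List (String × List (String × String))) (out : String) : Decidable (Spec_format_available_tools_py available_tools out) := by unfold Spec_format_available_tools_py; infer_instance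

-- ===== CLAIM (what is proved, stated in full; the proofs are below) =====
def Claim_equal_format_available_tools_py : Prop := ∀ (available_tools : List (String × List (String × String))), Dom_format_available_tools_py available_tools → Spec_format_available_tools_py available_tools (format_available_tools_py available_tools)

-- ===== LEMMAS AND PROOFS =====

-- the per-server tool list A's dict holds, expressed over B's flat rows
def pvGrp (rs : List (String × String × String)) (s : String) : List (String × String) :=
  (rs.filter (fun r => r.1 == s)).map (fun r => (r.2.1, r.2.2))

-- A's grouping step, expressed on a precomputed row
def pvRowStep (d : PySem.Dict String (List (String × String)))
    (r : String × String × String) : PySem.Dict String (List (String × String)) :=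
  let d := if d.contains r.1 then d else d.insert r.1 []
  d.modify r.1 [] (fun l => l ++ [(r.2.1, r.2.2)])

theorem pvAStep_eq_rowStep (d : PySem.Dict String (List (String × String)))
    (p : String × List (String × String)) : pvAStep d p = pvRowStep d (pvRow p) := rfl

theorem pvGrp_append (rs : List (String × String × String)) (r : String × String × String)
    (s : String) : pvGrp (rs ++ [r]) s
      = pvGrp rs s ++ (if r.1 == s then [(r.2.1, r.2.2)] else []) := by
  simp only [pvGrp, List.filter_append]
  by_cases h : r.1 == s <;> simp [List.filter, h]

theorem pvDedup_append {α : Type} [BEq α] [LawfulBEq α] (xs : List α) (x : α) :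
    PySem.List.dedup (xs ++ [x])
      = if x ∈ PySem.List.dedup xs then PySem.List.dedup xs else PySem.List.dedup xs ++ [x] := by
  simp only [PySem.List.dedup, PySem.Set.ofList, List.foldl_append, List.foldl_cons, List.foldl_nil,
    PySem.Set.add]
  by_cases h : x ∈ List.foldl PySem.Set.add PySem.Set.empty xs <;>
    simp [List.contains_eq_mem]

theorem pvFind_map_keys (K : List String) (g : String → List (String × String)) (k : String) :
    List.find? (fun p => p.1 == k) (K.map (fun s => (s, g s)))
      = (List.find? (fun s => s == k) K).map (fun s => (s, g s)) := by
  induction K with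
  | nil => rfl
  | cons a t ih =>
      by_cases h : a == k <;> simp [List.find?, h, ih]

theorem pvFind_self (K : List String) (x : String) (h : x ∈ K) :
    List.find? (fun s => s == x) K = some x := by
  induction K with
  | nil => cases h
  | cons a t ih =>
    by_cases ha : a = x
    · subst ha; simp
    · rw [List.find?_cons, beq_eq_false_iff_ne.mpr ha]
      exact ih ((List.mem_cons.mp h).resolve_left (fun he => ha he.symm))

theorem pvGrp_nil_of_not_mem (rs : List (String × String × String)) (s : String)
    (h : s ∉ rs.map (fun r => r.1)) : pvGrp rs s = [] := by
  simp only [pvGrp, List.map_eq_nil_iff, List.filter_eq_nil_iff]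
  intro r hr
  simp only [beq_iff_eq]
  intro he
  exact h (List.mem_map.mpr ⟨r, hr, he⟩)

-- one step of A's grouping loop on a dict in normal form
theorem pvRowStep_items (K : List String) (g : String → List (String × String))
    (r : String × String × String) :
    (pvRowStep ⟨K.map (fun s => (s, g s))⟩ r).items =
      if r.1 ∈ K then
        K.map (fun s => (s, if s = r.1 then g s ++ [(r.2.1, r.2.2)] else g s))
      else K.map (fun s => (s, g s)) ++ [(r.1, [(r.2.1, r.2.2)])] := by
  have hcont : (⟨K.map (fun s => (s, g s))⟩ : PySem.Dict String (List (String × String))).contains r.1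
      = decide (r.1 ∈ K) := by
    by_cases hm : r.1 ∈ K
    · simp only [hm, decide_true]
      simp only [PySem.Dict.contains, List.any_map, Function.comp, List.any_eq_true]
      exact ⟨r.1, hm, by simp⟩
    · simp only [hm, decide_false]
      simp only [PySem.Dict.contains, List.any_map, Function.comp, List.any_eq_false]
      intro s hs
      simp only [beq_iff_eq]
      intro he; exact hm (he ▸ hs)
  by_cases hm : r.1 ∈ K
  · rw [if_pos hm]
    have hc : (⟨K.map (fun s => (s, g s))⟩ : PySem.Dict String (List (String × String))).contains r.1 = true := by
      rw [hcont]; exact decide_eq_true hm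
    have hget : (⟨K.map (fun s => (s, g s))⟩ : PySem.Dict String (List (String × String))).get? r.1
        = some (g r.1) := by
      simp only [PySem.Dict.get?, pvFind_map_keys, pvFind_self K r.1 hm, Option.map_some]
    simp only [pvRowStep, hc, if_true, PySem.Dict.modify, PySem.Dict.getD, hget, Option.getD_some,
      PySem.Dict.insert, List.map_map]
    apply List.map_congr_left
    intro s _
    by_cases hsr : s = r.1
    · subst hsr; simp
    · simp [Function.comp, beq_eq_false_iff_ne.mpr hsr, hsr]
  · rw [if_neg hm]
    have hc : (⟨K.map (fun s => (s, g s))⟩ : PySem.Dict String (List (String × String))).contains r.1 = false := by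
      rw [hcont]; exact decide_eq_false hm
    have hfind0 : List.find? (fun p => p.1 == r.1) (K.map (fun s => (s, g s))) = none := by
      rw [pvFind_map_keys, List.find?_eq_none.mpr, Option.map_none]
      intro s hs
      simp only [beq_iff_eq]
      intro he; exact hm (he ▸ hs)
    have hc2 : (⟨K.map (fun s => (s, g s)) ++ [(r.1, ([] : List (String × String)))]⟩ :
        PySem.Dict String (List (String × String))).contains r.1 = true := by
      simp [PySem.Dict.contains]
    have hget : (⟨K.map (fun s => (s, g s)) ++ [(r.1, ([] : List (String × String)))]⟩ :
        PySem.Dict String (List (String × String))).get? r.1 = some [] := by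
      simp only [PySem.Dict.get?, List.find?_append, hfind0, Option.none_or]
      simp [List.find?]
    simp only [pvRowStep, hc, Bool.false_eq_true, if_false, PySem.Dict.insert,
      PySem.Dict.modify, PySem.Dict.getD, hget, Option.getD_some, hc2, if_true,
      List.map_append, List.map_map]
    congr 1
    · apply List.map_congr_left
      intro s hs
      have hsr : s ≠ r.1 := fun he => hm (he ▸ hs)
      simp [Function.comp, beq_eq_false_iff_ne.mpr hsr]
    · simp

-- invariant of A's grouping loop over rows
theorem pvFold_items (rs : List (String × String × String)) :
    (rs.foldl pvRowStep (PySem.Dict.mk [])).items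
      = (PySem.List.dedup (rs.map (fun r => r.1))).map (fun s => (s, pvGrp rs s)) := by
  induction rs using List.reverseRecOn with
  | nil => rfl
  | append_singleton rs r ih =>
    rw [List.foldl_append, List.foldl_cons, List.foldl_nil, List.map_append, List.map_cons,
      List.map_nil, pvDedup_append]
    set K := PySem.List.dedup (rs.map (fun r => r.1)) with hKdef
    have hD : rs.foldl pvRowStep (PySem.Dict.mk [])
        = (⟨K.map (fun s => (s, pvGrp rs s))⟩ : PySem.Dict String (List (String × String))) := by
      apply PySem.Dict.ext; exact ih
    rw [hD, pvRowStep_items]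
    have hmemK : r.1 ∈ K ↔ r.1 ∈ rs.map (fun r => r.1) := PySem.Set.mem_ofList _ _
    by_cases h : r.1 ∈ K
    · rw [if_pos h, if_pos h]
      apply List.map_congr_left
      intro s _
      by_cases hsr : s = r.1
      · subst hsr
        simp [pvGrp_append]
      · simp [pvGrp_append, beq_eq_false_iff_ne.mpr (Ne.symm hsr), hsr]
    · rw [if_neg h, if_neg h, List.map_append, List.map_cons, List.map_nil]
      congr 1
      · apply List.map_congr_left
        intro s hs
        have hsr : r.1 ≠ s := fun he => h (he ▸ hs)
        simp [pvGrp_append, beq_eq_false_iff_ne.mpr hsr]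
      · have hgrpnil : pvGrp rs r.1 = [] :=
          pvGrp_nil_of_not_mem rs r.1 (fun hmm => h (hmemK.mpr hmm))
        simp [pvGrp_append, hgrpnil]

-- sorted(servers.items()) over the characterised dict
theorem pvSorted_items (rs : List (String × String × String)) :
    PySem.List.sorted ((rs.foldl pvRowStep (PySem.Dict.mk [])).items) (fun q => q.1)
      = (PySem.List.sorted (PySem.List.dedup (rs.map (fun r => r.1))) (fun s => s)).map
          (fun s => (s, pvGrp rs s)) := by
  rw [pvFold_items rs]
  set K := PySem.List.dedup (rs.map (fun r => r.1)) with hKdef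
  apply PySem.List.sorted_eq_of_perm_of_pairwise_lt
  · exact (PySem.List.sorted_perm K (fun s => s) false).map _
  · have hnodup : (PySem.List.sorted K (fun s => s)).Nodup :=
      ((PySem.List.sorted_perm K (fun s => s) false).nodup_iff).mpr (PySem.List.nodup_dedup _)
    have hle : (PySem.List.sorted K (fun s => s)).Pairwise (fun a b => a ≤ b) :=
      PySem.List.sorted_pairwise K (fun s => s)
    rw [List.pairwise_map]
    exact (hle.and hnodup).imp (fun h => lt_of_le_of_ne h.1 h.2)

-- A's emit step agrees with B's emit step on a characterised group
theorem pvEmit_eq (rs : List (String × String × String)) (lines : List String) (s : String) :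
    pvAEmit lines (s, pvGrp rs s) = pvBEmit rs lines s := by
  show ((pvGrp rs s).foldl (fun l t => l ++ [pvToolLine t.1 t.2])
      (lines ++ [pvHeader s ((pvGrp rs s).length : Int)])) ++ [""]
    = (lines ++ [pvHeader s (((rs.filter (fun r => r.1 == s)).length : Nat) : Int)])
        ++ (rs.filter (fun r => r.1 == s)).map (fun r => pvToolLine r.2.1 r.2.2) ++ [""]
  rw [PySem.List.foldl_append_singleton_eq_map]
  simp [pvGrp, List.map_map, Function.comp]

theorem pvBEmit_ne_nil (rs : List (String × String × String)) (K : List String)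
    (acc : List String) (h : acc ≠ [] ∨ K ≠ []) : K.foldl (pvBEmit rs) acc ≠ [] := by
  induction K generalizing acc with
  | nil =>
      rcases h with h | h
      · simpa using h
      · exact absurd rfl h
  | cons k ks ih =>
      rw [List.foldl_cons]
      exact ih _ (Or.inl (by simp [pvBEmit]))

-- ===== VERDICT (by name: the statement is the Claim_ definition above) =====
theorem format_available_tools_py_spec : Claim_equal_format_available_tools_py := by
  intro ts _
  unfold Spec_format_available_tools_py format_available_tools_py format_available_tools_py_alt
  by_cases hts : ts = []
  · simp [hts]
  · simp only [if_neg hts]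
    have hfold : ts.foldl pvAStep (PySem.Dict.mk []) = (ts.map pvRow).foldl pvRowStep (PySem.Dict.mk []) := by
      rw [List.foldl_map]
      have he : (fun d p => pvRowStep d (pvRow p)) = pvAStep :=
        funext fun d => funext fun p => (pvAStep_eq_rowStep d p).symm
      rw [he]
    rw [hfold, pvSorted_items (ts.map pvRow), List.foldl_map]
    have hsteps : (fun (l : List String) (s : String) => pvAEmit l (s, pvGrp (ts.map pvRow) s))
        = pvBEmit (ts.map pvRow) := by
      funext l s; exact pvEmit_eq _ l s
    rw [hsteps]
    have hK : PySem.List.sorted (PySem.List.dedup ((ts.map pvRow).map (fun r => r.1))) (fun s => s) ≠ [] := by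
      rw [Ne, PySem.List.sorted_eq_nil_iff]
      obtain ⟨p, ts', rfl⟩ := List.exists_cons_of_ne_nil hts
      intro h
      have hm : (pvRow p).1 ∈ PySem.List.dedup (((p :: ts').map pvRow).map (fun r => r.1)) :=
        (PySem.Set.mem_ofList _ _).mpr (by simp)
      rw [h] at hm
      exact List.not_mem_nil hm
    have hne := pvBEmit_ne_nil (ts.map pvRow) _ [] (Or.inr hK)
    rw [if_neg hne]
    rfl
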